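-- pv_equiv track=rewrite | github.com/rohankumarrrr/ibc-data-pipelines | pipelines/new-consultant-pipeline.py | build_availability_sql_columns
-- ===== SOURCE A (Python) =====
-- def build_availability_sql_columns(row_entry, sheet_data):
--     time_slots = [key for key in sheet_data[0].keys() if "GMT-0600" in key]
--     time_slots.sort()
--     availability_sql_columns = ["availability_mon", "availability_tue", "availability_wed", "availability_thu", "availability_fri", "availability_sat", "availability_sun"]
--     availabilities = {day: ['0'] * 30 for day in availability_sql_columns}
--     for idx, slot in enumerate(time_slots):
--         available_days_str = row_entry.get(slot, "")
--         if not available_days_str or not available_days_str.strip():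
--             continue
--         available_days = [day.strip().lower() for day in available_days_str.split(",")]
--         for day in available_days:
--             if day == "monday":
--                 availabilities["availability_mon"][idx] = '1'
--             elif day == "tuesday":
--                 availabilities["availability_tue"][idx] = '1'
--             elif day == "wednesday":
--                 availabilities["availability_wed"][idx] = '1'
--             elif day == "thursday":
--                 availabilities["availability_thu"][idx] = '1'
--             elif day == "friday":
--                 availabilities["availability_fri"][idx] = '1'
--             elif day == "saturday":
--                 availabilities["availability_sat"][idx] = '1'
--             elif day == "sunday":
--                 availabilities["availability_sun"][idx] = '1'
--     output = {day: "".join(bits) for day, bits in availabilities.items()}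
--     return output
-- ===== SOURCE B (Python) =====
-- _DAY_COLS = [
--     ("availability_mon", "monday"),
--     ("availability_tue", "tuesday"),
--     ("availability_wed", "wednesday"),
--     ("availability_thu", "thursday"),
--     ("availability_fri", "friday"),
--     ("availability_sat", "saturday"),
--     ("availability_sun", "sunday"),
-- ]
--
--
-- def build_availability_sql_columns(row_entry, sheet_data):
--     time_slots = sorted(k for k in sheet_data[0].keys() if "GMT-0600" in k)
--     slot_days = []
--     for slot in time_slots:
--         s = row_entry.get(slot, "")
--         if s.strip():
--             slot_days.append({d.strip().lower() for d in s.split(",")})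
--         else:
--             slot_days.append(set())
--     return {
--         col: "".join(
--             "1" if i < len(slot_days) and day in slot_days[i] else "0"
--             for i in range(30)
--         )
--         for col, day in _DAY_COLS
--     }
-- ===== Notes on version B (the rewrite author's own statement) =====
-- stated objective: idiomatic
-- what changed: A initialises seven 30-slot '0' bit-lists in a dict and mutates bits row-major via a 7-way elif chain inside a nested loop; B first indexes each sorted slot to a set of normalised day names, then builds each column string column-major with a join over range(30) driven by a (column, weekday) table.
import Mathlib
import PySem

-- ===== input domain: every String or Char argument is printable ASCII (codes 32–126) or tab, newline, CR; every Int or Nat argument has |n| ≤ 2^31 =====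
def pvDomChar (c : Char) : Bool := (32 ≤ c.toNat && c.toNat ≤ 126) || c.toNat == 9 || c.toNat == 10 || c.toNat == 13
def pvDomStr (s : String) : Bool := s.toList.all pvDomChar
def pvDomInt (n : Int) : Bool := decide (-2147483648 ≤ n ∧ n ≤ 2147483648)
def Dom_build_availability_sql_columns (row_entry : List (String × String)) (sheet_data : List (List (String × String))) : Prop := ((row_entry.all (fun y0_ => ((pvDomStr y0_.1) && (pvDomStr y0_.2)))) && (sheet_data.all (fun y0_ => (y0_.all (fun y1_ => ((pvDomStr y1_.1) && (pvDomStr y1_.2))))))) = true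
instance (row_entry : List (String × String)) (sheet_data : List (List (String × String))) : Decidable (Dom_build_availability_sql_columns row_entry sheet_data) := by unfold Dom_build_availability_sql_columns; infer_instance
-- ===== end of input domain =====

-- B replaces A's row-major 'init seven zero bit-lists then set bits via a 7-way elif chain'
-- with an index-then-transpose build (per-slot day sets, then each column string column-major);
-- objective: idiomatic, same cost.

-- ===== PORT A =====
-- shared line of both Pythons: sorted([key for key in sheet_data[0].keys() if "GMT-0600" in key])
def pvTimeSlots (d0 : List (String × String)) : List String :=
  PySem.List.sorted (((PySem.Dict.ofList d0).keys).filter (fun k => PySem.Str.isIn "GMT-0600" k))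
    (fun x => x) false

-- shared line of both Pythons: [day.strip().lower() for day in s.split(",")]  ("," ≠ "", so split? is some)
def pvParseDays (s : String) : List String :=
  ((PySem.Str.split? s ",").getD []).map (fun d => PySem.Str.lower (PySem.Str.strip d))

def pvCols : List String :=
  ["availability_mon", "availability_tue", "availability_wed", "availability_thu",
   "availability_fri", "availability_sat", "availability_sun"]

-- A's 7-way elif chain over one day name: availabilities[col][idx] = '1'
-- is ported with pySetD (Python raises IndexError at idx >= 30; Pre_ keeps idx < 30).
def pvDStep (i : Int) (av : PySem.Dict String (List String)) (day : String) : PySem.Dict String (List String) :=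
  if day = "monday" then av.modify "availability_mon" [] (fun l => PySem.List.pySetD l i "1")
  else if day = "tuesday" then av.modify "availability_tue" [] (fun l => PySem.List.pySetD l i "1")
  else if day = "wednesday" then av.modify "availability_wed" [] (fun l => PySem.List.pySetD l i "1")
  else if day = "thursday" then av.modify "availability_thu" [] (fun l => PySem.List.pySetD l i "1")
  else if day = "friday" then av.modify "availability_fri" [] (fun l => PySem.List.pySetD l i "1")
  else if day = "saturday" then av.modify "availability_sat" [] (fun l => PySem.List.pySetD l i "1")
  else if day = "sunday" then av.modify "availability_sun" [] (fun l => PySem.List.pySetD l i "1")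
  else av

-- A's loop body over one enumerated slot (idx, slot) = (p.1, p.2)
def pvAStep (row_entry : List (String × String)) (av : PySem.Dict String (List String))
    (p : Int × String) : PySem.Dict String (List String) :=
  let s := (PySem.Dict.ofList row_entry).getD p.2 ""
  if s = "" ∨ PySem.Str.strip s = "" then av
  else (pvParseDays s).foldl (pvDStep p.1) av

def build_availability_sql_columns (row_entry : List (String × String)) (sheet_data : List (List (String × String))) : List (String × String) :=
  match sheet_data with
  | [] => []   -- Python raises IndexError on sheet_data[0]; excluded by Pre_
  | d0 :: _ =>
    ((PySem.List.enumerate (pvTimeSlots d0)).foldl (pvAStep row_entry)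
        (pvCols.foldl (fun d day => d.insert day (List.replicate 30 "0")) PySem.Dict.empty)).items.map
      (fun p => (p.1, PySem.Str.join "" p.2))

-- ===== PORT B =====
def pvDayCols : List (String × String) :=
  [("availability_mon", "monday"), ("availability_tue", "tuesday"), ("availability_wed", "wednesday"),
   ("availability_thu", "thursday"), ("availability_fri", "friday"), ("availability_sat", "saturday"),
   ("availability_sun", "sunday")]

-- B's per-slot set of normalised day names
def pvSlotSet (row_entry : List (String × String)) (slot : String) : PySem.Set String :=
  let s := (PySem.Dict.ofList row_entry).getD slot ""
  if PySem.Str.strip s = "" then PySem.Set.empty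
  else PySem.Set.ofList (pvParseDays s)

def build_availability_sql_columns_alt (row_entry : List (String × String)) (sheet_data : List (List (String × String))) : List (String × String) :=
  match sheet_data with
  | [] => []   -- Python raises IndexError on sheet_data[0]; excluded by Pre_
  | d0 :: _ =>
    let slot_days := (pvTimeSlots d0).map (pvSlotSet row_entry)
    -- 'i < len(slot_days) and day in slot_days[i]' is exactly a lookup with default empty set
    pvDayCols.map (fun c =>
      (c.1, PySem.Str.join "" ((List.range 30).map (fun i =>
        if PySem.Set.contains (slot_days.getD i PySem.Set.empty) c.2 then "1" else "0"))))

-- ===== PRECONDITION & SPEC =====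
-- Pre_ excludes (a) empty sheet_data, where Python A raises IndexError on sheet_data[0], and
-- (b) first rows with more than 30 "GMT-0600" keys: there A raises IndexError as soon as a matching
-- weekday occurs at slot index ≥ 30 (the whole >30 shape is excluded because whether A raises
-- depends on the row contents; on the all-empty cited input A returns and B returns the same value).
def Pre_build_availability_sql_columns (row_entry : List (String × String)) (sheet_data : List (List (String × String))) : Prop :=
  sheet_data ≠ [] ∧
    (((PySem.Dict.ofList sheet_data.headI).keys).filter (fun k => PySem.Str.isIn "GMT-0600" k)).length ≤ 30
instance (row_entry : List (String × String)) (sheet_data : List (List (String × String))) : Decidable (Pre_build_availability_sql_columns row_entry sheet_data) := by unfold Pre_build_availability_sql_columns; infer_instance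

def pvWitness_build_availability_sql_columns : (List (String × String)) × (List (List (String × String))) :=
  ([("8:00 AM (GMT-0600)", "Monday, tuesday")],
   [[("8:00 AM (GMT-0600)", ""), ("Name", "x")]])

def Spec_build_availability_sql_columns (row_entry : List (String × String)) (sheet_data : List (List (String × String))) (out : List (String × String)) : Prop := out = build_availability_sql_columns_alt row_entry sheet_data
instance (row_entry : List (String × String)) (sheet_data : List (List (String × String))) (out : List (String × String)) : Decidable (Spec_build_availability_sql_columns row_entry sheet_data out) := by unfold Spec_build_availability_sql_columns; infer_instance

-- ===== CLAIM (what is proved, stated in full; the proofs are below) =====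
def Claim_equal_build_availability_sql_columns : Prop := ∀ (row_entry : List (String × String)) (sheet_data : List (List (String × String))), Dom_build_availability_sql_columns row_entry sheet_data → Pre_build_availability_sql_columns row_entry sheet_data → Spec_build_availability_sql_columns row_entry sheet_data (build_availability_sql_columns row_entry sheet_data)

-- ===== LEMMAS AND PROOFS =====

-- 'slot contributes a 1-bit for this weekday': the content of one step of A's loop,
-- and (lemma pv_contains_slotSet) the membership B tests.
def pvQ (row_entry : List (String × String)) (day slot : String) : Bool :=
  let s := (PySem.Dict.ofList row_entry).getD slot ""
  !(decide (PySem.Str.strip s = "")) && (pvParseDays s).contains day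

-- per-day projection of A's outer fold
def pvF (row_entry : List (String × String)) (day : String) : List String → Int → List String → List String
  | [], _, l => l
  | t :: ts, k, l =>
      pvF row_entry day ts (k + 1) (if pvQ row_entry day t then PySem.List.pySetD l k "1" else l)

def pvMk7 (l1 l2 l3 l4 l5 l6 l7 : List String) : PySem.Dict String (List String) :=
  PySem.Dict.ofList
    [("availability_mon", l1), ("availability_tue", l2), ("availability_wed", l3),
     ("availability_thu", l4), ("availability_fri", l5), ("availability_sat", l6), ("availability_sun", l7)]

lemma pv_init : pvCols.foldl (fun d day => d.insert day (List.replicate 30 "0")) PySem.Dict.empty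
    = pvMk7 (List.replicate 30 "0") (List.replicate 30 "0") (List.replicate 30 "0") (List.replicate 30 "0")
        (List.replicate 30 "0") (List.replicate 30 "0") (List.replicate 30 "0") := rfl

lemma pvMk7_items (l1 l2 l3 l4 l5 l6 l7 : List String) :
    (pvMk7 l1 l2 l3 l4 l5 l6 l7).items =
    [("availability_mon", l1), ("availability_tue", l2), ("availability_wed", l3),
     ("availability_thu", l4), ("availability_fri", l5), ("availability_sat", l6), ("availability_sun", l7)] := rfl

lemma pvSetD_idem (xs : List String) (i : Int) (v : String) :
    PySem.List.pySetD (PySem.List.pySetD xs i v) i v = PySem.List.pySetD xs i v := by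
  cases h : PySem.List.pyIdx? xs.length i with
  | none => simp [PySem.List.pySetD, PySem.List.pySet?, h]
  | some k => simp [PySem.List.pySetD, PySem.List.pySet?, h, List.length_set, List.set_set]

lemma pvDStep_mon (i : Int) (l1 l2 l3 l4 l5 l6 l7 : List String) :
    pvDStep i (pvMk7 l1 l2 l3 l4 l5 l6 l7) "monday" = pvMk7 (PySem.List.pySetD l1 i "1") l2 l3 l4 l5 l6 l7 := rfl
lemma pvDStep_tue (i : Int) (l1 l2 l3 l4 l5 l6 l7 : List String) :
    pvDStep i (pvMk7 l1 l2 l3 l4 l5 l6 l7) "tuesday" = pvMk7 l1 (PySem.List.pySetD l2 i "1") l3 l4 l5 l6 l7 := rfl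
lemma pvDStep_wed (i : Int) (l1 l2 l3 l4 l5 l6 l7 : List String) :
    pvDStep i (pvMk7 l1 l2 l3 l4 l5 l6 l7) "wednesday" = pvMk7 l1 l2 (PySem.List.pySetD l3 i "1") l4 l5 l6 l7 := rfl
lemma pvDStep_thu (i : Int) (l1 l2 l3 l4 l5 l6 l7 : List String) :
    pvDStep i (pvMk7 l1 l2 l3 l4 l5 l6 l7) "thursday" = pvMk7 l1 l2 l3 (PySem.List.pySetD l4 i "1") l5 l6 l7 := rfl
lemma pvDStep_fri (i : Int) (l1 l2 l3 l4 l5 l6 l7 : List String) :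
    pvDStep i (pvMk7 l1 l2 l3 l4 l5 l6 l7) "friday" = pvMk7 l1 l2 l3 l4 (PySem.List.pySetD l5 i "1") l6 l7 := rfl
lemma pvDStep_sat (i : Int) (l1 l2 l3 l4 l5 l6 l7 : List String) :
    pvDStep i (pvMk7 l1 l2 l3 l4 l5 l6 l7) "saturday" = pvMk7 l1 l2 l3 l4 l5 (PySem.List.pySetD l6 i "1") l7 := rfl
lemma pvDStep_sun (i : Int) (l1 l2 l3 l4 l5 l6 l7 : List String) :
    pvDStep i (pvMk7 l1 l2 l3 l4 l5 l6 l7) "sunday" = pvMk7 l1 l2 l3 l4 l5 l6 (PySem.List.pySetD l7 i "1") := rfl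
lemma pvDStep_other (i : Int) (av : PySem.Dict String (List String)) (day : String)
    (h1 : day ≠ "monday") (h2 : day ≠ "tuesday") (h3 : day ≠ "wednesday") (h4 : day ≠ "thursday")
    (h5 : day ≠ "friday") (h6 : day ≠ "saturday") (h7 : day ≠ "sunday") :
    pvDStep i av day = av := by simp [pvDStep, h1, h2, h3, h4, h5, h6, h7]

lemma pv_set_twice (i : Int) (l : List String) (c : Prop) [Decidable c] :
    (if c then PySem.List.pySetD (PySem.List.pySetD l i "1") i "1" else PySem.List.pySetD l i "1")
      = PySem.List.pySetD l i "1" := by split <;> simp [pvSetD_idem]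

lemma pv_inner (i : Int) (days : List String) (l1 l2 l3 l4 l5 l6 l7 : List String) :
    days.foldl (pvDStep i) (pvMk7 l1 l2 l3 l4 l5 l6 l7)
    = pvMk7 (if days.contains "monday" then PySem.List.pySetD l1 i "1" else l1)
            (if days.contains "tuesday" then PySem.List.pySetD l2 i "1" else l2)
            (if days.contains "wednesday" then PySem.List.pySetD l3 i "1" else l3)
            (if days.contains "thursday" then PySem.List.pySetD l4 i "1" else l4)
            (if days.contains "friday" then PySem.List.pySetD l5 i "1" else l5)
            (if days.contains "saturday" then PySem.List.pySetD l6 i "1" else l6)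
            (if days.contains "sunday" then PySem.List.pySetD l7 i "1" else l7) := by
  induction days generalizing l1 l2 l3 l4 l5 l6 l7 with
  | nil => simp
  | cons d rest ih =>
    rw [List.foldl_cons]
    by_cases h1 : d = "monday"
    · subst h1; rw [pvDStep_mon, ih]
      simp only [List.contains_cons, String.reduceBEq, beq_self_eq_true, Bool.true_or,
        Bool.false_or, if_true, pv_set_twice]
    by_cases h2 : d = "tuesday"
    · subst h2; rw [pvDStep_tue, ih]
      simp only [List.contains_cons, String.reduceBEq, beq_self_eq_true, Bool.true_or,
        Bool.false_or, if_true, pv_set_twice]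
    by_cases h3 : d = "wednesday"
    · subst h3; rw [pvDStep_wed, ih]
      simp only [List.contains_cons, String.reduceBEq, beq_self_eq_true, Bool.true_or,
        Bool.false_or, if_true, pv_set_twice]
    by_cases h4 : d = "thursday"
    · subst h4; rw [pvDStep_thu, ih]
      simp only [List.contains_cons, String.reduceBEq, beq_self_eq_true, Bool.true_or,
        Bool.false_or, if_true, pv_set_twice]
    by_cases h5 : d = "friday"
    · subst h5; rw [pvDStep_fri, ih]
      simp only [List.contains_cons, String.reduceBEq, beq_self_eq_true, Bool.true_or,
        Bool.false_or, if_true, pv_set_twice]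
    by_cases h6 : d = "saturday"
    · subst h6; rw [pvDStep_sat, ih]
      simp only [List.contains_cons, String.reduceBEq, beq_self_eq_true, Bool.true_or,
        Bool.false_or, if_true, pv_set_twice]
    by_cases h7 : d = "sunday"
    · subst h7; rw [pvDStep_sun, ih]
      simp only [List.contains_cons, String.reduceBEq, beq_self_eq_true, Bool.true_or,
        Bool.false_or, if_true, pv_set_twice]
    · rw [pvDStep_other i _ d h1 h2 h3 h4 h5 h6 h7, ih]
      simp only [List.contains_cons, beq_eq_false_iff_ne.mpr (Ne.symm h1),
        beq_eq_false_iff_ne.mpr (Ne.symm h2), beq_eq_false_iff_ne.mpr (Ne.symm h3),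
        beq_eq_false_iff_ne.mpr (Ne.symm h4), beq_eq_false_iff_ne.mpr (Ne.symm h5),
        beq_eq_false_iff_ne.mpr (Ne.symm h6), beq_eq_false_iff_ne.mpr (Ne.symm h7), Bool.false_or]

lemma pv_outer (row_entry : List (String × String)) (ts : List String) (k : Int)
    (l1 l2 l3 l4 l5 l6 l7 : List String) :
    (PySem.List.enumerate ts k).foldl (pvAStep row_entry) (pvMk7 l1 l2 l3 l4 l5 l6 l7)
    = pvMk7 (pvF row_entry "monday" ts k l1) (pvF row_entry "tuesday" ts k l2)
        (pvF row_entry "wednesday" ts k l3) (pvF row_entry "thursday" ts k l4)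
        (pvF row_entry "friday" ts k l5) (pvF row_entry "saturday" ts k l6)
        (pvF row_entry "sunday" ts k l7) := by
  induction ts generalizing k l1 l2 l3 l4 l5 l6 l7 with
  | nil => rfl
  | cons t ts ih =>
    have hcons : PySem.List.enumerate (t :: ts) k = (k, t) :: PySem.List.enumerate ts (k + 1) := rfl
    rw [hcons, List.foldl_cons]
    by_cases hs : PySem.Str.strip ((PySem.Dict.ofList row_entry).getD t "") = ""
    · have hstep : pvAStep row_entry (pvMk7 l1 l2 l3 l4 l5 l6 l7) (k, t) = pvMk7 l1 l2 l3 l4 l5 l6 l7 := by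
        simp only [pvAStep]
        rw [if_pos (Or.inr hs)]
      rw [hstep, ih]
      simp [pvF, pvQ, hs]
    · have hne : ¬(((PySem.Dict.ofList row_entry).getD t "") = "" ∨
          PySem.Str.strip ((PySem.Dict.ofList row_entry).getD t "") = "") := by
        rintro (h0 | h0)
        · apply hs; rw [h0]; rfl
        · exact hs h0
      have hstep : pvAStep row_entry (pvMk7 l1 l2 l3 l4 l5 l6 l7) (k, t)
          = (pvParseDays ((PySem.Dict.ofList row_entry).getD t "")).foldl (pvDStep k)
              (pvMk7 l1 l2 l3 l4 l5 l6 l7) := by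
        simp only [pvAStep]
        rw [if_neg hne]
      rw [hstep, pv_inner, ih]
      simp [pvF, pvQ, hs]

lemma pvF_length (row_entry : List (String × String)) (day : String) (ts : List String) (k : Int)
    (l : List String) : (pvF row_entry day ts k l).length = l.length := by
  induction ts generalizing k l with
  | nil => rfl
  | cons t ts ih => rw [pvF, ih]; split <;> simp [PySem.List.length_pySetD]

lemma pvSetD_getElem? (xs : List String) (n j : Nat) (v : String) :
    (PySem.List.pySetD xs ((n : Nat) : Int) v)[j]? = if j = n ∧ n < xs.length then some v else xs[j]? := by
  by_cases h : n < xs.length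
  · have hidx : PySem.List.pyIdx? xs.length ((n : Nat) : Int) = some n := by
      simp [PySem.List.pyIdx?, h]
    simp only [PySem.List.pySetD, PySem.List.pySet?, hidx, Option.map_some, Option.getD_some,
      List.getElem?_set]
    by_cases hjn : j = n
    · subst hjn; rw [if_pos rfl, if_pos h, if_pos ⟨rfl, h⟩]
    · rw [if_neg (fun hh => hjn hh.symm), if_neg (by rintro ⟨h1, -⟩; exact hjn h1)]
  · have hidx : PySem.List.pyIdx? xs.length ((n : Nat) : Int) = none := by
      simp [PySem.List.pyIdx?]
      omega
    simp only [PySem.List.pySetD, PySem.List.pySet?, hidx, Option.map_none, Option.getD_none]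
    rw [if_neg]; omega

lemma pvF_spec (row_entry : List (String × String)) (day : String) (ts : List String) :
    ∀ (k : Nat) (l : List String) (j : Nat), j < l.length →
    (pvF row_entry day ts ((k : Nat) : Int) l)[j]? =
      if k ≤ j ∧ j - k < ts.length ∧ pvQ row_entry day (ts.getD (j - k) "") then some "1" else l[j]? := by
  induction ts with
  | nil => intro k l j hj; simp [pvF]
  | cons t ts ih =>
    intro k l j hj
    rw [pvF]
    have hk1 : ((k : Int) + 1) = (((k + 1 : Nat)) : Int) := by push_cast; ring
    have hlen : (if pvQ row_entry day t then PySem.List.pySetD l (k : Int) "1" else l).length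
        = l.length := by split <;> simp [PySem.List.length_pySetD]
    rw [hk1, ih (k + 1) _ j (by rw [hlen]; exact hj)]
    by_cases hjk : j = k
    · subst hjk
      have h1 : ¬(j + 1 ≤ j) := by omega
      rw [if_neg (by intro h; exact h1 h.1)]
      have hgd : (t :: ts).getD (j - j) "" = t := by simp
      rw [hgd]
      by_cases hq : pvQ row_entry day t
      · rw [if_pos hq, pvSetD_getElem?, if_pos ⟨rfl, hj⟩,
          if_pos ⟨le_refl j, by simpa using Nat.succ_pos ts.length, by simpa using hq⟩]
      · rw [if_neg hq, if_neg (by rintro ⟨-, -, hc⟩; exact hq (by simpa using hc))]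
    · have hrhs : (if pvQ row_entry day t then PySem.List.pySetD l (k : Int) "1" else l)[j]? = l[j]? := by
        split
        · rw [pvSetD_getElem?, if_neg (by rintro ⟨h, -⟩; exact hjk h)]
        · rfl
      rw [hrhs]
      by_cases hlow : k ≤ j
      · have hk : k + 1 ≤ j := by omega
        have hsub : j - k = (j - (k + 1)) + 1 := by omega
        rw [hsub]
        simp only [List.length_cons, List.getD_cons_succ]
        congr 1
        rw [eq_iff_iff]
        constructor
        · rintro ⟨-, h2, h3⟩; exact ⟨hlow, by omega, h3⟩
        · rintro ⟨-, h2, h3⟩; exact ⟨hk, by omega, h3⟩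
      · rw [if_neg (by rintro ⟨h, -⟩; omega), if_neg (by rintro ⟨h, -⟩; omega)]

lemma pv_contains_slotSet (row_entry : List (String × String)) (day t : String) :
    PySem.Set.contains (pvSlotSet row_entry t) day = pvQ row_entry day t := by
  simp only [pvSlotSet, pvQ]
  by_cases h : PySem.Str.strip ((PySem.Dict.ofList row_entry).getD t "") = ""
  · simp [h, PySem.Set.contains_eq_listContains, PySem.Set.empty]
  · simp only [if_neg h, decide_eq_false h, Bool.not_false, Bool.true_and,
      PySem.Set.contains_eq_listContains]
    rw [List.contains_eq_mem, List.contains_eq_mem]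
    simp [PySem.Set.mem_ofList]

lemma pv_col (row_entry : List (String × String)) (day : String) (ts : List String) :
    pvF row_entry day ts 0 (List.replicate 30 "0") =
    (List.range 30).map (fun i =>
      if PySem.Set.contains ((ts.map (pvSlotSet row_entry)).getD i PySem.Set.empty) day then "1" else "0") := by
  apply List.ext_getElem?
  intro j
  by_cases hj : j < 30
  · have h0 : (0 : Int) = ((0 : Nat) : Int) := rfl
    rw [h0, pvF_spec row_entry day ts 0 _ j (by simp [hj]),
      List.getElem?_map, List.getElem?_range hj]
    simp only [Nat.zero_le, true_and, Nat.sub_zero, Option.map_some]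
    by_cases hlt : j < ts.length
    · have hgd : (ts.map (pvSlotSet row_entry)).getD j PySem.Set.empty = pvSlotSet row_entry (ts.getD j "") := by
        rw [List.getD_eq_getElem _ _ (by simpa using hlt), List.getElem_map,
          List.getD_eq_getElem _ _ hlt]
      rw [hgd, pv_contains_slotSet]
      by_cases hq : pvQ row_entry day (ts.getD j "")
      · rw [if_pos ⟨hlt, hq⟩, if_pos hq]
      · rw [if_neg (by rintro ⟨-, h⟩; exact hq h), if_neg hq,
          List.getElem?_replicate, if_pos hj]
    · have hgd : (ts.map (pvSlotSet row_entry)).getD j PySem.Set.empty = PySem.Set.empty := by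
        rw [List.getD_eq_default _ _ (by simpa using Nat.le_of_not_lt hlt)]
      rw [hgd, if_neg (by rintro ⟨h, -⟩; exact hlt h),
        if_neg (by simp [PySem.Set.contains_eq_listContains, PySem.Set.empty]),
        List.getElem?_replicate, if_pos hj]
  · rw [List.getElem?_eq_none (by simpa [pvF_length] using Nat.le_of_not_lt hj),
      List.getElem?_eq_none (by simpa using Nat.le_of_not_lt hj)]

-- ===== VERDICT (by name: the statement is the Claim_ definition above) =====
theorem build_availability_sql_columns_spec : Claim_equal_build_availability_sql_columns := by
  intro row_entry sheet_data _ hpre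
  unfold Spec_build_availability_sql_columns
  cases sheet_data with
  | nil => exact absurd rfl hpre.1
  | cons d0 rest =>
    show build_availability_sql_columns row_entry (d0 :: rest)
        = build_availability_sql_columns_alt row_entry (d0 :: rest)
    unfold build_availability_sql_columns build_availability_sql_columns_alt
    simp only [pv_init, pv_outer, pvMk7_items, pvDayCols, List.map_cons, List.map_nil]
    simp only [List.cons.injEq, Prod.mk.injEq, and_true, true_and]
    refine ⟨?_, ?_, ?_, ?_, ?_, ?_, ?_⟩ <;>
      exact congrArg (PySem.Str.join "") (pv_col row_entry _ (pvTimeSlots d0))
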